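-- pv_equiv track=rewrite | github.com/Lns-XueFeng/PyAlgorithm | Chapter05/OJ题1.py | tile_ways
-- ===== SOURCE A (Python) =====
-- def tile_ways(N):
--     dp = [0] * (N + 1)
--     dp[0] = 1
--     for i in range(1, N + 1):
--         for j in [1, 2, 3, 4]:
--             if i - j >= 0:
--                 dp[i] += dp[i - j]
--     return dp[N]
-- ===== SOURCE B (Python) =====
-- def _mat_mul(A, B):
--     return [[sum(A[i][k] * B[k][j] for k in range(4)) for j in range(4)]
--             for i in range(4)]
--
--
-- def _mat_pow(M, e):
--     R = [[1 if i == j else 0 for j in range(4)] for i in range(4)]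
--     while e > 0:
--         if e % 2 == 1:
--             R = _mat_mul(R, M)
--         M = _mat_mul(M, M)
--         e //= 2
--     return R
--
--
-- def tile_ways(N):
--     if N < 4:
--         return [1, 1, 2, 4][N] if N >= 0 else 0
--     T = [[1, 1, 1, 1],
--          [1, 0, 0, 0],
--          [0, 1, 0, 0],
--          [0, 0, 1, 0]]
--     P = _mat_pow(T, N - 3)
--     return P[0][0] * 4 + P[0][1] * 2 + P[0][2] * 1 + P[0][3] * 1
-- ===== Notes on version B (the rewrite author's own statement) =====
-- stated objective: faster
-- what changed: Replaces the O(N) dynamic-programming table with binary matrix exponentiation of the 4-term tetranacci recurrence (answer read off the first row of M^(N-3) applied to the base vector).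
import Mathlib
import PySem

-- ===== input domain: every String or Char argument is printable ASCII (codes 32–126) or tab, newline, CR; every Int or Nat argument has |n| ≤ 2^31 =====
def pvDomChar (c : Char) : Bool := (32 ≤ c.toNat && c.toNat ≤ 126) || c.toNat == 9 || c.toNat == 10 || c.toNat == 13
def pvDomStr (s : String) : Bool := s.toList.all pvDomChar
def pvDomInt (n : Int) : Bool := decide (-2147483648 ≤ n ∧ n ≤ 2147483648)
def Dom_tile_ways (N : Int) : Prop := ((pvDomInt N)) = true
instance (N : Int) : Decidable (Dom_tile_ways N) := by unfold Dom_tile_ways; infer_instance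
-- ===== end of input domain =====

-- B replaces A's O(N) dp table with O(log N) binary matrix exponentiation of the
-- 4-term recurrence; equivalence of the RETURN value is proved for all N ≥ 0.

-- ===== PORT A =====
def tile_ways (N : Int) : Int :=
  if N < 0 then 0  -- Python raises IndexError here (dp[0] = 1 on an empty list); excluded by Pre_
  else
    let n := N.toNat
    -- dp = [0] * (N + 1); dp[0] = 1
    let dp0 : List Int := (List.replicate (n + 1) 0).set 0 1
    -- for i in range(1, N + 1): for j in [1,2,3,4]: if i - j >= 0: dp[i] += dp[i - j]
    let dp := (List.range' 1 n).foldl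
      (fun dp (i : Nat) => [1, 2, 3, 4].foldl
        (fun dp (j : Nat) => if (i : Int) - (j : Int) ≥ 0
          then dp.set i (dp.getD i 0 + dp.getD (i - j) 0) else dp) dp) dp0
    dp.getD n 0

-- ===== PORT B =====
-- a 4x4 integer matrix, entries materialized (as Python's list-of-lists is)
structure Mat4 where
  a00 : Int
  a01 : Int
  a02 : Int
  a03 : Int
  a10 : Int
  a11 : Int
  a12 : Int
  a13 : Int
  a20 : Int
  a21 : Int
  a22 : Int
  a23 : Int
  a30 : Int
  a31 : Int
  a32 : Int
  a33 : Int
deriving DecidableEq, Repr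

-- _mat_mul: entry (i, j) is sum(A[i][k] * B[k][j] for k in range(4)), written out
def matMul (A B : Mat4) : Mat4 :=
  ⟨A.a00*B.a00 + A.a01*B.a10 + A.a02*B.a20 + A.a03*B.a30,
   A.a00*B.a01 + A.a01*B.a11 + A.a02*B.a21 + A.a03*B.a31,
   A.a00*B.a02 + A.a01*B.a12 + A.a02*B.a22 + A.a03*B.a32,
   A.a00*B.a03 + A.a01*B.a13 + A.a02*B.a23 + A.a03*B.a33,
   A.a10*B.a00 + A.a11*B.a10 + A.a12*B.a20 + A.a13*B.a30,
   A.a10*B.a01 + A.a11*B.a11 + A.a12*B.a21 + A.a13*B.a31,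
   A.a10*B.a02 + A.a11*B.a12 + A.a12*B.a22 + A.a13*B.a32,
   A.a10*B.a03 + A.a11*B.a13 + A.a12*B.a23 + A.a13*B.a33,
   A.a20*B.a00 + A.a21*B.a10 + A.a22*B.a20 + A.a23*B.a30,
   A.a20*B.a01 + A.a21*B.a11 + A.a22*B.a21 + A.a23*B.a31,
   A.a20*B.a02 + A.a21*B.a12 + A.a22*B.a22 + A.a23*B.a32,
   A.a20*B.a03 + A.a21*B.a13 + A.a22*B.a23 + A.a23*B.a33,
   A.a30*B.a00 + A.a31*B.a10 + A.a32*B.a20 + A.a33*B.a30,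
   A.a30*B.a01 + A.a31*B.a11 + A.a32*B.a21 + A.a33*B.a31,
   A.a30*B.a02 + A.a31*B.a12 + A.a32*B.a22 + A.a33*B.a32,
   A.a30*B.a03 + A.a31*B.a13 + A.a32*B.a23 + A.a33*B.a33⟩

-- the while-loop of _mat_pow (e > 0; square-and-multiply), recursion on e
def matPowLoop (e : Nat) (M R : Mat4) : Mat4 :=
  if h : e = 0 then R
  else matPowLoop (e / 2) (matMul M M) (if e % 2 = 1 then matMul R M else R)
decreasing_by exact Nat.div_lt_self (Nat.pos_of_ne_zero h) one_lt_two

def tile_ways_alt (N : Int) : Int :=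
  if N < 4 then (if 0 ≤ N then ([1, 1, 2, 4] : List Int).getD N.toNat 0 else 0)
  else
    -- T = [[1,1,1,1],[1,0,0,0],[0,1,0,0],[0,0,1,0]]; R starts as the identity matrix
    let P := matPowLoop (N - 3).toNat
      ⟨1,1,1,1, 1,0,0,0, 0,1,0,0, 0,0,1,0⟩
      ⟨1,0,0,0, 0,1,0,0, 0,0,1,0, 0,0,0,1⟩
    P.a00 * 4 + P.a01 * 2 + P.a02 * 1 + P.a03 * 1

-- ===== PRECONDITION & SPEC =====
-- Pre_ excludes exactly the inputs N < 0, on which the Python A raises IndexError.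
def Pre_tile_ways (N : Int) : Prop := 0 ≤ N
instance (N : Int) : Decidable (Pre_tile_ways N) := by unfold Pre_tile_ways; infer_instance
def pvWitness_tile_ways : Int := (6)


def Spec_tile_ways (N : Int) (out : Int) : Prop := out = tile_ways_alt N
instance (N : Int) (out : Int) : Decidable (Spec_tile_ways N out) := by unfold Spec_tile_ways; infer_instance

-- ===== CLAIM (what is proved, stated in full; the proofs are below) =====
def Claim_equal_tile_ways : Prop := ∀ (N : Int), Dom_tile_ways N → Pre_tile_ways N → Spec_tile_ways N (tile_ways N)

-- ===== LEMMAS AND PROOFS =====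

-- the reference sequence: number of ordered tilings of length n with pieces 1..4
def tet : Nat → Int
  | 0 => 1
  | 1 => 1
  | 2 => 2
  | 3 => 4
  | (n+4) => tet (n+3) + tet (n+2) + tet (n+1) + tet n

-- ---- B side ----

def toM (A : Mat4) : Matrix (Fin 4) (Fin 4) Int :=
  Matrix.of ![![A.a00, A.a01, A.a02, A.a03], ![A.a10, A.a11, A.a12, A.a13],
    ![A.a20, A.a21, A.a22, A.a23], ![A.a30, A.a31, A.a32, A.a33]]

lemma toM_matMul (A B : Mat4) : toM (matMul A B) = toM A * toM B := by
  ext i j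
  fin_cases i <;> fin_cases j <;>
    simp [toM, matMul, Matrix.mul_apply, Fin.sum_univ_four]

lemma matPowLoop_eq (e : Nat) : ∀ M R : Mat4,
    toM (matPowLoop e M R) = toM R * toM M ^ e := by
  induction e using Nat.strong_induction_on with
  | _ e ih =>
    intro M R
    rw [matPowLoop]
    split
    · subst ‹e = 0›; simp
    · rename_i h
      rw [ih (e / 2) (Nat.div_lt_self (Nat.pos_of_ne_zero h) one_lt_two)]
      rw [toM_matMul, ← pow_two, ← pow_mul]
      rcases Nat.mod_two_eq_zero_or_one e with he | he
      · have h2 : 2 * (e / 2) = e := by omega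
        rw [if_neg (by omega), h2]
      · have h2 : 2 * (e / 2) + 1 = e := by omega
        rw [if_pos (by omega), toM_matMul, mul_assoc, ← pow_succ', h2]

def tetVec (k : Nat) : Fin 4 → Int := ![tet (k+3), tet (k+2), tet (k+1), tet k]

def Tmat : Matrix (Fin 4) (Fin 4) Int := Matrix.of ![![1,1,1,1],![1,0,0,0],![0,1,0,0],![0,0,1,0]]

lemma Tmat_pow_mulVec (k : Nat) : (Tmat ^ k).mulVec (tetVec 0) = tetVec k := by
  induction k with
  | zero => simp
  | succ k ih =>
    rw [pow_succ', ← Matrix.mulVec_mulVec, ih]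
    funext i
    fin_cases i <;>
      simp [Tmat, tetVec, Matrix.mulVec, dotProduct, Fin.sum_univ_four,
        show ∀ m, tet (m + 4) = tet (m + 3) + tet (m + 2) + tet (m + 1) + tet m from fun _ => rfl]

lemma tile_ways_alt_eq_tet (N : Int) (h : 0 ≤ N) : tile_ways_alt N = tet N.toNat := by
  by_cases h4 : N < 4
  · interval_cases N <;> simp [tile_ways_alt, tet]
  · have hN : N.toNat = (N - 3).toNat + 3 := by omega
    simp only [tile_ways_alt, if_neg h4]
    have hP : toM (matPowLoop (N - 3).toNat ⟨1,1,1,1, 1,0,0,0, 0,1,0,0, 0,0,1,0⟩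
        ⟨1,0,0,0, 0,1,0,0, 0,0,1,0, 0,0,0,1⟩) = Tmat ^ (N - 3).toNat := by
      rw [matPowLoop_eq]
      have hId : toM ⟨1,0,0,0, 0,1,0,0, 0,0,1,0, 0,0,0,1⟩ = (1 : Matrix (Fin 4) (Fin 4) Int) := by
        ext i j; fin_cases i <;> fin_cases j <;> simp [toM]
      have hT : toM ⟨1,1,1,1, 1,0,0,0, 0,1,0,0, 0,0,1,0⟩ = Tmat := by
        ext i j; fin_cases i <;> fin_cases j <;> simp [toM, Tmat]
      rw [hId, hT, one_mul]
    have h0 := congrFun (Tmat_pow_mulVec ((N - 3).toNat)) 0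
    simp only [tetVec, Matrix.mulVec, dotProduct, Fin.sum_univ_four,
      Matrix.cons_val_zero, Matrix.cons_val_one, Matrix.head_cons,
      Matrix.cons_val_two, Matrix.cons_val_three, Matrix.tail_cons] at h0
    rw [← hP] at h0
    have e0 : tet 0 = 1 := rfl
    have e1 : tet 1 = 1 := rfl
    have e2 : tet 2 = 2 := rfl
    have e3 : tet 3 = 4 := rfl
    rw [e0, e1, e2, e3] at h0
    simp only [toM, Matrix.of_apply, Matrix.cons_val_zero, Matrix.cons_val_one, Matrix.head_cons,
      Matrix.cons_val_two, Matrix.cons_val_three, Matrix.tail_cons] at h0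
    rw [hN]
    linarith [h0]

-- ---- A side ----

-- dp after processing outer indices 1..i: first i+1 entries hold tet, rest 0
def dpVec (n i : Nat) : List Int := (List.range (n + 1)).map (fun k => if k ≤ i then tet k else 0)

lemma dpVec_length (n i : Nat) : (dpVec n i).length = n + 1 := by simp [dpVec]

lemma dpVec_getD (n i k : Nat) (hk : k ≤ n) :
    (dpVec n i).getD k 0 = if k ≤ i then tet k else 0 := by
  rw [List.getD_eq_getElem _ _ (by simp [dpVec]; omega)]
  simp [dpVec]

lemma getD_set_self (l : List Int) (i : Nat) (x : Int) (h : i < l.length) :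
    (l.set i x).getD i 0 = x := by
  rw [List.getD_eq_getElem _ _ (by simpa using h)]
  simp

lemma getD_set_ne (l : List Int) (i k : Nat) (x : Int) (h : k ≠ i) :
    (l.set i x).getD k 0 = l.getD k 0 := by
  simp [List.getD_eq_getElem?_getD, List.getElem?_set_ne (Ne.symm h)]

lemma set_dpVec (n i : Nat) (h1 : 1 ≤ i) (_hi : i ≤ n) :
    (dpVec n (i - 1)).set i (tet i) = dpVec n i := by
  apply List.ext_getElem (by simp [dpVec])
  intro k hk1 hk2
  simp only [dpVec, List.getElem_set, List.getElem_map, List.getElem_range]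
  split_ifs <;> simp_all <;> omega

lemma getD_set_dpVec (n a i : Nat) (hi : i ≤ n) (k : Nat) (x : Int) :
    ((dpVec n a).set i x).getD k 0 = if k = i then x else (dpVec n a).getD k 0 := by
  rcases eq_or_ne k i with rfl | hk
  · rw [if_pos rfl, getD_set_self _ _ _ (by rw [dpVec_length]; omega)]
  · rw [if_neg hk, getD_set_ne _ _ _ _ hk]

lemma inner_step (n i : Nat) (h1 : 1 ≤ i) (hi : i ≤ n) :
    [1, 2, 3, 4].foldl
      (fun dp (j : Nat) => if (i : Int) - (j : Int) ≥ 0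
        then dp.set i (dp.getD i 0 + dp.getD (i - j) 0) else dp) (dpVec n (i - 1))
    = dpVec n i := by
  simp only [List.foldl_cons, List.foldl_nil]
  rcases Nat.lt_or_ge i 4 with h4 | h4
  · interval_cases i
    · -- i = 1
      split_ifs <;> try (exfalso; omega)
      rw [show (1:Nat) - 1 = 0 from rfl]
      simp only [dpVec_getD n 0 1 (by omega), dpVec_getD n 0 0 (by omega)]
      norm_num
      rw [show (tet 0 : Int) = tet 1 from by decide]
      exact set_dpVec n 1 (by omega) hi
    · -- i = 2
      split_ifs <;> try (exfalso; omega)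
      rw [show (2:Nat) - 1 = 1 from rfl, show (2:Nat) - 2 = 0 from rfl]
      simp only [getD_set_dpVec n 1 2 (by omega), List.set_set,
        dpVec_getD n 1 2 (by omega), dpVec_getD n 1 1 (by omega),
        dpVec_getD n 1 0 (by omega)]
      norm_num
      rw [show ((tet 1 + tet 0 : Int)) = tet 2 from by decide]
      exact set_dpVec n 2 (by omega) hi
    · -- i = 3
      split_ifs <;> try (exfalso; omega)
      rw [show (3:Nat) - 1 = 2 from rfl, show (3:Nat) - 2 = 1 from rfl,
        show (3:Nat) - 3 = 0 from rfl]
      simp only [getD_set_dpVec n 2 3 (by omega), List.set_set,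
        dpVec_getD n 2 3 (by omega), dpVec_getD n 2 2 (by omega),
        dpVec_getD n 2 1 (by omega), dpVec_getD n 2 0 (by omega)]
      norm_num
      rw [show ((tet 2 + tet 1 + tet 0 : Int)) = tet 3 from by decide]
      exact set_dpVec n 3 (by omega) hi
  · -- i ≥ 4
    obtain ⟨m, rfl⟩ : ∃ m, i = m + 4 := ⟨i - 4, by omega⟩
    split_ifs <;> try (exfalso; omega)
    rw [show m + 4 - 1 = m + 3 from by omega, show m + 4 - 2 = m + 2 from by omega,
      show m + 4 - 3 = m + 1 from by omega, show m + 4 - 4 = m from by omega]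
    simp only [getD_set_dpVec n (m + 3) (m + 4) (by omega), List.set_set,
      dpVec_getD n (m + 3) (m + 4) (by omega), dpVec_getD n (m + 3) (m + 3) (by omega),
      dpVec_getD n (m + 3) (m + 2) (by omega), dpVec_getD n (m + 3) (m + 1) (by omega),
      dpVec_getD n (m + 3) m (by omega),
      if_true, if_false,
      eq_false (show ¬(m + 2 = m + 4) from by omega),
      eq_false (show ¬(m + 1 = m + 4) from by omega),
      eq_false (show ¬(m = m + 4) from by omega),
      eq_false (show ¬(m + 4 ≤ m + 3) from by omega),
      eq_true (show m + 3 ≤ m + 3 from by omega),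
      eq_true (show m + 2 ≤ m + 3 from by omega),
      eq_true (show m + 1 ≤ m + 3 from by omega),
      eq_true (show m ≤ m + 3 from by omega)]
    rw [show ((0:Int) + tet (m + 3) + tet (m + 2) + tet (m + 1) + tet m) = tet (m + 4) from by
      rw [show tet (m + 4) = tet (m + 3) + tet (m + 2) + tet (m + 1) + tet m from rfl]; ring]
    have := set_dpVec n (m + 4) (by omega) hi
    rwa [show m + 4 - 1 = m + 3 from by omega] at this

lemma outer_fold (n : Nat) : ∀ i, i ≤ n →
    (List.range' 1 i).foldl
      (fun dp (i : Nat) => [1, 2, 3, 4].foldl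
        (fun dp (j : Nat) => if (i : Int) - (j : Int) ≥ 0
          then dp.set i (dp.getD i 0 + dp.getD (i - j) 0) else dp) dp)
      (dpVec n 0) = dpVec n i := by
  intro i
  induction i with
  | zero => simp
  | succ i ih =>
    intro h
    rw [List.range'_1_concat, List.foldl_append, ih (by omega)]
    have h2 := inner_step n (i + 1) (by omega) h
    rw [show i + 1 - 1 = i from rfl] at h2
    rw [show 1 + i = i + 1 from Nat.add_comm 1 i, List.foldl_cons, List.foldl_nil]
    exact h2

lemma dp0_eq (n : Nat) : (List.replicate (n + 1) (0 : Int)).set 0 1 = dpVec n 0 := by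
  apply List.ext_getElem (by simp [dpVec])
  intro k hk1 hk2
  simp only [dpVec, List.getElem_set, List.getElem_map, List.getElem_range, List.getElem_replicate]
  rcases Nat.eq_zero_or_pos k with rfl | hk
  · simp [show tet 0 = 1 from rfl]
  · rw [if_neg (by omega), if_neg (by omega)]

lemma tile_ways_eq_tet (N : Int) (h : 0 ≤ N) : tile_ways N = tet N.toNat := by
  simp only [tile_ways, if_neg (not_lt.mpr h)]
  rw [dp0_eq, outer_fold N.toNat N.toNat le_rfl, dpVec_getD _ _ _ le_rfl, if_pos le_rfl]

-- ===== VERDICT (by name: the statement is the Claim_ definition above) =====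
theorem tile_ways_spec : Claim_equal_tile_ways := by
  intro N _ hpre
  unfold Spec_tile_ways
  rw [tile_ways_eq_tet N hpre, tile_ways_alt_eq_tet N hpre]
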